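-- pv_equiv track=rewrite | github.com/ThereIsOnlyZuul/ahmes-scribeware | Generics/formatter.py | separate_list_items
-- ===== SOURCE A (Python) =====
-- def separate_list_items(list_of_values,seperator):
-- 	if len(list_of_values) < 2:
-- 		return list_of_values
-- 	result = [list_of_values[0]]
-- 	for x in list_of_values[1:]:
-- 		result.append(seperator)
-- 		result.append(x)
-- 	return result
-- ===== SOURCE B (Python) =====
-- def separate_list_items(list_of_values, seperator):
--     if len(list_of_values) < 2:
--         return list_of_values
--     n = len(list_of_values)
--     result = [seperator] * (2 * n - 1)
--     result[::2] = list_of_values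
--     return result
-- ===== Notes on version B (the rewrite author's own statement) =====
-- stated objective: idiomatic
-- what changed: Replaces the per-item append loop with preallocating a separator-filled list of length 2n-1 and placing the values via the strided slice assignment result[::2] = list_of_values.
import Mathlib
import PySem

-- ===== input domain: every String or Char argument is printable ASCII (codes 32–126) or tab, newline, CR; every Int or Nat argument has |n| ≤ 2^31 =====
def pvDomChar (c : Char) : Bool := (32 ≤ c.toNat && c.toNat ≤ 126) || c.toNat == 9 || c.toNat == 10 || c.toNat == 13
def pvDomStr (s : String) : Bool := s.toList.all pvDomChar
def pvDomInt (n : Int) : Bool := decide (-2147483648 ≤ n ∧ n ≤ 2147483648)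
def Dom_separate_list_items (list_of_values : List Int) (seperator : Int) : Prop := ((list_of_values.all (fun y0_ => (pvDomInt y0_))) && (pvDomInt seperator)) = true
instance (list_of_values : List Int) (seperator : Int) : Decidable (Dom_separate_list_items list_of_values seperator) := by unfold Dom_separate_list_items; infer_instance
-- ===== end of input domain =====

-- B replaces the per-item append loop with a preallocated separator-filled list of length 2n-1
-- plus a strided slice assignment result[::2] = list_of_values (idiomatic decomposition, same cost).

-- ===== PORT A =====
def separate_list_items (list_of_values : List Int) (seperator : Int) : List Int :=
  if list_of_values.length < 2 then list_of_values
  else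
    let result := [PySem.List.pyGetD list_of_values 0 0]
    (PySem.List.slice list_of_values (some 1) none).foldl
      (fun r x => r ++ [seperator, x]) result

-- ===== PORT B =====
-- result[::2] = vs on a list whose length is exactly 2*len(vs)-1: replace the even positions.
def pvAssignStride2 : List Int → List Int → List Int
  | _ :: r' :: rs, v :: vs => v :: r' :: pvAssignStride2 rs vs
  | [_], v :: _ => [v]
  | rs, [] => rs
  | [], _ :: _ => []

def separate_list_items_alt (list_of_values : List Int) (seperator : Int) : List Int :=
  if list_of_values.length < 2 then list_of_values
  else
    let n := list_of_values.length
    let result := List.replicate (2 * n - 1) seperator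
    pvAssignStride2 result list_of_values

-- ===== PRECONDITION & SPEC =====
def Spec_separate_list_items (list_of_values : List Int) (seperator : Int) (out : List Int) : Prop := out = separate_list_items_alt list_of_values seperator
instance (list_of_values : List Int) (seperator : Int) (out : List Int) : Decidable (Spec_separate_list_items list_of_values seperator out) := by unfold Spec_separate_list_items; infer_instance

-- ===== CLAIM (what is proved, stated in full; the proofs are below) =====
def Claim_equal_separate_list_items : Prop := ∀ (list_of_values : List Int) (seperator : Int), Dom_separate_list_items list_of_values seperator → Spec_separate_list_items list_of_values seperator (separate_list_items list_of_values seperator)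

-- ===== LEMMAS AND PROOFS =====
lemma pvAssignStride2_replicate (sep v : Int) (vs : List Int) :
    pvAssignStride2 (List.replicate (2 * vs.length + 1) sep) (v :: vs)
      = v :: vs.flatMap (fun x => [sep, x]) := by
  induction vs generalizing v with
  | nil => rfl
  | cons w ws ih =>
      have h : 2 * (w :: ws).length + 1 = (2 * ws.length + 1) + 1 + 1 := by
        simp [List.length_cons]; omega
      rw [h, List.replicate_succ, List.replicate_succ, pvAssignStride2, ih]
      simp

-- ===== VERDICT (by name: the statement is the Claim_ definition above) =====
theorem separate_list_items_spec : Claim_equal_separate_list_items := by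
  intro lvs sep _
  show separate_list_items lvs sep = separate_list_items_alt lvs sep
  unfold separate_list_items separate_list_items_alt
  by_cases h : lvs.length < 2
  · simp [h]
  · simp only [h, if_false]
    obtain ⟨v, vs, rfl⟩ : ∃ v vs, lvs = v :: vs := by
      cases lvs with
      | nil => simp at h
      | cons a t => exact ⟨a, t, rfl⟩
    have hn : 2 * (v :: vs).length - 1 = 2 * vs.length + 1 := by
      simp [List.length_cons]; omega
    rw [hn]
    rw [PySem.List.slice_from_one]
    simp only [List.tail_cons, PySem.List.pyGetD_zero_cons]
    rw [PySem.List.foldl_append_eq_flatMap, pvAssignStride2_replicate]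
    rfl
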